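-- pv_equiv track=rewrite | github.com/asbabiy/2020-2-level-labs | lab_2/main.py | find_diff_in_sentence
-- ===== SOURCE A (Python) =====
-- def find_diff_in_sentence(original_sentence_tokens: tuple, suspicious_sentence_tokens: tuple, lcs: tuple) -> tuple:
--     """
--     Finds words not present in lcs.
--     :param original_sentence_tokens: a tuple of tokens
--     :param suspicious_sentence_tokens: a tuple of tokens
--     :param lcs: a longest common subsequence
--     :return: a tuple with tuples of indexes
--     """
--     checks = [
--         isinstance(original_sentence_tokens, tuple),
--         isinstance(suspicious_sentence_tokens, tuple),
--         isinstance(lcs, tuple)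
--     ]
--
--     if not all(checks):
--         return ()
--
--     origin = original_sentence_tokens
--     suspicious = suspicious_sentence_tokens
--
--     diff_1 = tuple(idx for idx, x in enumerate(origin) if x not in lcs)
--     diff_2 = tuple(idx for idx, x in enumerate(suspicious) if x not in lcs)
--
--     if diff_1 and diff_2:
--         diff_report = (diff_1[0], diff_1[-1] + 1), (diff_2[0], diff_2[-1] + 1)
--         return diff_report
-- ===== SOURCE B (Python) =====
-- def find_diff_in_sentence(original_sentence_tokens: tuple, suspicious_sentence_tokens: tuple, lcs: tuple) -> tuple:
--     """Two single-index scans per sentence (first/last missing token) instead of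
--     materialising the full index tuple of missing tokens."""
--     if not (isinstance(original_sentence_tokens, tuple)
--             and isinstance(suspicious_sentence_tokens, tuple)
--             and isinstance(lcs, tuple)):
--         return ()
--
--     def first_missing(tokens):
--         for i in range(len(tokens)):
--             if tokens[i] not in lcs:
--                 return i
--         return None
--
--     def last_missing(tokens):
--         for i in range(len(tokens) - 1, -1, -1):
--             if tokens[i] not in lcs:
--                 return i
--         return None
--
--     first_o = first_missing(original_sentence_tokens)
--     first_s = first_missing(suspicious_sentence_tokens)
--     if first_o is not None and first_s is not None:
--         return ((first_o, last_missing(original_sentence_tokens) + 1),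
--                 (first_s, last_missing(suspicious_sentence_tokens) + 1))
-- ===== Notes on version B (the rewrite author's own statement) =====
-- stated objective: faster
-- what changed: Instead of materialising the full index tuple of tokens missing from lcs for each sentence, B does a forward scan for the first missing index and a backward scan for the last missing index, stopping at the first hit, so most tokens are never tested for membership in lcs.
import Mathlib
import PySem

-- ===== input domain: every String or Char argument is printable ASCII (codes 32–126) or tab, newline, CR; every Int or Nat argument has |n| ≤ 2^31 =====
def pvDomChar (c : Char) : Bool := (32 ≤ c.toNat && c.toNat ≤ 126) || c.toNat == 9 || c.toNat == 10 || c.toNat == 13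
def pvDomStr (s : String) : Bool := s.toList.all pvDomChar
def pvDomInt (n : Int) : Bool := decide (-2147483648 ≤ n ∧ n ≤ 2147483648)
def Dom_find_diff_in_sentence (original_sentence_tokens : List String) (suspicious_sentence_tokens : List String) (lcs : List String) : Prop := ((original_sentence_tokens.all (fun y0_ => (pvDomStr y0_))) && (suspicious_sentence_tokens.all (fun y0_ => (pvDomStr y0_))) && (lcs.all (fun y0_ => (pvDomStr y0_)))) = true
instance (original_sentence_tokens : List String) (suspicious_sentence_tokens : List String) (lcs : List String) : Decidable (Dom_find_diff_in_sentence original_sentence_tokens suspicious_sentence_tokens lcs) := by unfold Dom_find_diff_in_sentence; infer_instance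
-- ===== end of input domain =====

-- B replaces the materialised index tuples of missing tokens by one forward scan
-- (first missing index) and one backward scan (last missing index) per sentence.

-- ===== PORT A =====
def find_diff_in_sentence (original_sentence_tokens : List String) (suspicious_sentence_tokens : List String) (lcs : List String) : Option (List (Int × Int)) :=
  -- the three isinstance(…, tuple) checks are always true under the type convention
  let checks := [true, true, true]
  if !(checks.all id) then some [] else
  let origin := original_sentence_tokens
  let suspicious := suspicious_sentence_tokens
  let diff_1 := ((PySem.List.enumerate origin).filter (fun p => !(lcs.contains p.2))).map (·.1)
  let diff_2 := ((PySem.List.enumerate suspicious).filter (fun p => !(lcs.contains p.2))).map (·.1)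
  if diff_1 ≠ [] ∧ diff_2 ≠ [] then
    some [(diff_1.head!, diff_1.getLast! + 1), (diff_2.head!, diff_2.getLast! + 1)]
  else
    none

-- ===== PORT B =====
-- forward scan: index of the first token not in lcs, counting from i
def pvFirstMiss (lcs : List String) : List String → Int → Option Int
  | [], _ => none
  | t :: ts, i => if lcs.contains t then pvFirstMiss lcs ts (i + 1) else some i

-- backward scan: index of the last token not in lcs, counting from i
def pvLastMiss (lcs : List String) : List String → Int → Option Int
  | [], _ => none
  | t :: ts, i =>
    match pvLastMiss lcs ts (i + 1) with
    | some j => some j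
    | none => if lcs.contains t then none else some i

def find_diff_in_sentence_alt (original_sentence_tokens : List String) (suspicious_sentence_tokens : List String) (lcs : List String) : Option (List (Int × Int)) :=
  match pvFirstMiss lcs original_sentence_tokens 0, pvFirstMiss lcs suspicious_sentence_tokens 0 with
  | some f1, some f2 =>
    some [(f1, (pvLastMiss lcs original_sentence_tokens 0).getD 0 + 1),
          (f2, (pvLastMiss lcs suspicious_sentence_tokens 0).getD 0 + 1)]
  | _, _ => none

-- ===== PRECONDITION & SPEC =====
def Spec_find_diff_in_sentence (original_sentence_tokens : List String) (suspicious_sentence_tokens : List String) (lcs : List String) (out : Option (List (Int × Int))) : Prop := out = find_diff_in_sentence_alt original_sentence_tokens suspicious_sentence_tokens lcs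
instance (original_sentence_tokens : List String) (suspicious_sentence_tokens : List String) (lcs : List String) (out : Option (List (Int × Int))) : Decidable (Spec_find_diff_in_sentence original_sentence_tokens suspicious_sentence_tokens lcs out) := by unfold Spec_find_diff_in_sentence; infer_instance

-- ===== CLAIM (what is proved, stated in full; the proofs are below) =====
def Claim_equal_find_diff_in_sentence : Prop := ∀ (original_sentence_tokens : List String) (suspicious_sentence_tokens : List String) (lcs : List String), Dom_find_diff_in_sentence original_sentence_tokens suspicious_sentence_tokens lcs → Spec_find_diff_in_sentence original_sentence_tokens suspicious_sentence_tokens lcs (find_diff_in_sentence original_sentence_tokens suspicious_sentence_tokens lcs)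

-- ===== LEMMAS AND PROOFS =====

def pvFilt (lcs xs : List String) (i : Int) : List Int :=
  ((PySem.List.enumerate xs i).filter (fun p => !(lcs.contains p.2))).map (·.1)

theorem pvFilt_head? (lcs xs : List String) (i : Int) :
    (pvFilt lcs xs i).head? = pvFirstMiss lcs xs i := by
  induction xs generalizing i with
  | nil => simp [pvFilt, pvFirstMiss, PySem.List.enumerate_nil]
  | cons t ts ih =>
    by_cases h : t ∈ lcs <;>
      simp [pvFilt, pvFirstMiss, PySem.List.enumerate_cons, h, ← ih (i + 1)]

theorem pvFilt_getLast? (lcs xs : List String) (i : Int) :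
    (pvFilt lcs xs i).getLast? = pvLastMiss lcs xs i := by
  induction xs generalizing i with
  | nil => simp [pvFilt, pvLastMiss, PySem.List.enumerate_nil]
  | cons t ts ih =>
    rw [show pvLastMiss lcs (t :: ts) i = (match pvLastMiss lcs ts (i + 1) with
      | some j => some j
      | none => if lcs.contains t then none else some i) from rfl, ← ih (i + 1)]
    by_cases h : t ∈ lcs <;>
      simp only [pvFilt, PySem.List.enumerate_cons, List.filter_cons, h,
        List.contains_eq_mem, decide_true, decide_false, Bool.not_true, Bool.not_false,
        Bool.false_eq_true, if_pos, if_neg, not_false_eq_true, List.map_cons] <;>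
      cases hm : (pvFilt lcs ts (i + 1)).getLast? <;>
      simp_all [pvFilt, List.getLast?_cons, Option.getD]

-- ===== VERDICT (by name: the statement is the Claim_ definition above) =====
theorem find_diff_in_sentence_spec : Claim_equal_find_diff_in_sentence := by
  intro o s lcs _
  show _ = _
  unfold find_diff_in_sentence find_diff_in_sentence_alt
  simp only [List.all_cons, id, Bool.and_true, Bool.not_true, List.all_nil,
    Bool.false_eq_true, if_neg, not_false_eq_true]
  have h1h := pvFilt_head? lcs o 0
  have h2h := pvFilt_head? lcs s 0
  have h1l := pvFilt_getLast? lcs o 0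
  have h2l := pvFilt_getLast? lcs s 0
  set d1 := pvFilt lcs o 0 with hd1
  set d2 := pvFilt lcs s 0 with hd2
  show (if d1 ≠ [] ∧ d2 ≠ [] then
    some [(d1.head!, d1.getLast! + 1), (d2.head!, d2.getLast! + 1)] else none) = _
  cases hf1 : pvFirstMiss lcs o 0 <;> cases hf2 : pvFirstMiss lcs s 0 <;>
    rw [hf1] at h1h <;> rw [hf2] at h2h
  · have : d1 = [] := List.head?_eq_none_iff.mp h1h
    simp [this]
  · have : d1 = [] := List.head?_eq_none_iff.mp h1h
    simp [this]
  · have : d2 = [] := List.head?_eq_none_iff.mp h2h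
    simp [this]
  · rename_i f1 f2
    have hne1 : d1 ≠ [] := by intro h; simp [h] at h1h
    have hne2 : d2 ≠ [] := by intro h; simp [h] at h2h
    rw [if_pos ⟨hne1, hne2⟩]
    cases hl1 : pvLastMiss lcs o 0 with
    | none => rw [hl1] at h1l; exact absurd (List.getLast?_eq_none_iff.mp h1l) hne1
    | some l1 =>
      cases hl2 : pvLastMiss lcs s 0 with
      | none => rw [hl2] at h2l; exact absurd (List.getLast?_eq_none_iff.mp h2l) hne2
      | some l2 =>
        rw [hl1] at h1l; rw [hl2] at h2l
        rw [List.head!_of_head? h1h, List.head!_of_head? h2h,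
          List.getLast!_of_getLast? h1l, List.getLast!_of_getLast? h2l]
        rfl
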